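-- pv_equiv track=rewrite | github.com/barzaazad/CSCI-B551 | Assignment 3/part3/image2text.py | check_black_train
-- ===== SOURCE A (Python) =====
-- def check_black_train(train_letters):
--     black_train = 0
--     train_total = 0
--     for letter in train_letters:
--         for line in train_letters[letter]:
--             for char in line:
--                 train_total += 1
--                 if char == '*':
--                     black_train += 1
--
--     return [black_train,train_total]
-- ===== SOURCE B (Python) =====
-- def check_black_train(train_letters):
--     big = "".join("".join(block) for block in train_letters.values())
--     train_total = len(big)
--     black_train = train_total - len(big.replace('*', ''))
--     return [black_train, train_total]
-- ===== Notes on version B (the rewrite author's own statement) =====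
-- stated objective: alternative
-- what changed: Instead of counting '*' char by char in a branching triple loop with a per-key dict lookup, B joins all lines into one string and derives the black count as the length drop after deleting '*' via str.replace (no counting loop or count call at all).
import Mathlib
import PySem

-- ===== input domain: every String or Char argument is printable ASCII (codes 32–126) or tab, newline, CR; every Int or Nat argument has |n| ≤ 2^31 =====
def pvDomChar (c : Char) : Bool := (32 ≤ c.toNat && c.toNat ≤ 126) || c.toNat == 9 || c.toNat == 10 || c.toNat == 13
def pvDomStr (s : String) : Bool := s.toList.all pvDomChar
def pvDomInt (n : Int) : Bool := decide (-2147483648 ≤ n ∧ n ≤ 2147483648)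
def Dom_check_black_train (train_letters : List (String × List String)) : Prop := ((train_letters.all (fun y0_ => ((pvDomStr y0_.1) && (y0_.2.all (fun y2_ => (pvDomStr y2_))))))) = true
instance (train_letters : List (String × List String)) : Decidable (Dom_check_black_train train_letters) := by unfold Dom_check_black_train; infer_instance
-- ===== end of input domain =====

-- B joins all lines into one string and derives the '*' count as the length drop after
-- deleting '*' with str.replace, instead of A's char-by-char branching triple loop (alternative).


-- ===== PORT A =====
-- 'for letter in train_letters' iterates the dict's keys in insertion order;
-- 'train_letters[letter]' is the dict lookup, ported as Dict.getD (never misses for a key of the dict).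
def check_black_train (train_letters : List (String × List String)) : List Int :=
  let st : Int × Int := train_letters.foldl
    (fun st kv =>
      ((PySem.Dict.mk train_letters).getD kv.1 []).foldl
        (fun st line =>
          line.toList.foldl
            (fun st c =>
              let st' := (st.1, st.2 + 1)
              if c = '*' then (st'.1 + 1, st'.2) else st') st) st)
    ((0 : Int), (0 : Int))
  [st.1, st.2]

-- ===== PORT B =====
def check_black_train_alt (train_letters : List (String × List String)) : List Int :=
  let big := PySem.Str.join "" (train_letters.map (fun kv => PySem.Str.join "" kv.2))
  let train_total := PySem.Str.len big
  let black_train := train_total - PySem.Str.len (PySem.Str.replace big "*" "")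
  [black_train, train_total]

-- ===== PRECONDITION & SPEC =====
-- A's argument is a Python dict, so its keys are pairwise distinct; Pre_ states exactly that for the
-- association list (a duplicate-keyed list represents no dict, and no input A receives is excluded).
def Pre_check_black_train (train_letters : List (String × List String)) : Prop :=
  (train_letters.map Prod.fst).Nodup
instance (train_letters : List (String × List String)) : Decidable (Pre_check_black_train train_letters) := by unfold Pre_check_black_train; infer_instance

def pvWitness_check_black_train : (List (String × List String)) :=
  [("a", ["*. ", ""]), ("b", ["**"])]

def Spec_check_black_train (train_letters : List (String × List String)) (out : List Int) : Prop := out = check_black_train_alt train_letters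
instance (train_letters : List (String × List String)) (out : List Int) : Decidable (Spec_check_black_train train_letters out) := by unfold Spec_check_black_train; infer_instance

-- ===== CLAIM (what is proved, stated in full; the proofs are below) =====
def Claim_equal_check_black_train : Prop := ∀ (train_letters : List (String × List String)), Dom_check_black_train train_letters → Pre_check_black_train train_letters → Spec_check_black_train train_letters (check_black_train train_letters)

-- ===== LEMMAS AND PROOFS =====

-- the inner char loop counts '*' and the length
theorem char_fold (cs : List Char) : ∀ (b t : Int),
    cs.foldl (fun (st : Int × Int) c =>
        let st' := (st.1, st.2 + 1)
        if c = '*' then (st'.1 + 1, st'.2) else st') (b, t)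
      = (b + (cs.count '*' : Int), t + (cs.length : Int)) := by
  induction cs with
  | nil => intro b t; simp
  | cons h tl ih =>
      intro b t
      by_cases hc : h = '*'
      · subst hc
        simp only [List.foldl_cons, ih, Prod.mk.injEq, List.count_cons,
          List.length_cons, BEq.rfl, if_true]
        push_cast
        omega
      · simp only [List.foldl_cons, if_neg hc, ih, Prod.mk.injEq, List.count_cons,
          List.length_cons]
        push_cast
        rw [if_neg (by simp [hc])]
        omega

-- the loop over a list of lines accumulates the count of '*' and the length of the flattening
theorem lines_fold (L : List String) : ∀ (b t : Int),
    L.foldl (fun st line =>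
        line.toList.foldl (fun (st : Int × Int) c =>
          let st' := (st.1, st.2 + 1)
          if c = '*' then (st'.1 + 1, st'.2) else st') st) (b, t)
      = (b + ((L.flatMap String.toList).count '*' : Int),
         t + ((L.flatMap String.toList).length : Int)) := by
  induction L with
  | nil => intro b t; simp
  | cons l ls ih =>
      intro b t
      simp only [List.foldl_cons, char_fold, ih, List.flatMap_cons, List.count_append,
        List.length_append, Prod.mk.injEq]
      push_cast
      constructor <;> ring

-- the outer loop (after lookup elimination) aggregates over the flattened char list
theorem outer_fold (tl : List (String × List String)) : ∀ (b t : Int),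
    tl.foldl (fun st kv =>
        kv.2.foldl (fun st line =>
          line.toList.foldl (fun (st : Int × Int) c =>
            let st' := (st.1, st.2 + 1)
            if c = '*' then (st'.1 + 1, st'.2) else st') st) st) (b, t)
      = (b + (((tl.flatMap (fun kv => kv.2)).flatMap String.toList).count '*' : Int),
         t + (((tl.flatMap (fun kv => kv.2)).flatMap String.toList).length : Int)) := by
  induction tl with
  | nil => intro b t; simp
  | cons kv rest ih =>
      intro b t
      simp only [List.foldl_cons, lines_fold, ih, List.flatMap_cons, List.flatMap_append,
        List.count_append, List.length_append, Prod.mk.injEq]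
      push_cast
      constructor <;> ring

-- the concatenation of the per-block joins is the flattening of all lines' characters
theorem big_flat (tl : List (String × List String)) :
    (tl.map (String.toList ∘ fun kv => String.ofList ((kv.2.map String.toList).flatten))).flatten
      = (tl.flatMap (fun kv => kv.2)).flatMap String.toList := by
  induction tl with
  | nil => rfl
  | cons kv rest ih =>
      simp [Function.comp, String.toList_ofList, ih, List.flatMap_def]

-- "".join with empty separator is flattening
theorem chars_join_nil_sep (l : List (List Char)) : PySem.Chars.join [] l = l.flatten := by
  induction l with
  | nil => rfl
  | cons h t ih =>
      simp [PySem.Chars.join, List.intercalate] at *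
      cases t <;> simp_all [List.intersperse]

-- replace.go with pattern "*" and empty replacement deletes every '*'
theorem replace_go_star (l : List Char) : ∀ (fuel : Nat) (acc : List Char),
    l.length ≤ fuel →
    PySem.Chars.replace.go ['*'] [] fuel l acc
      = acc.reverse ++ l.filter (fun c => !(c == '*')) := by
  induction l with
  | nil =>
      intro fuel acc _
      cases fuel <;> simp [PySem.Chars.replace.go]
  | cons h t ih =>
      intro fuel acc hle
      cases fuel with
      | zero => simp at hle
      | succ f =>
        simp only [PySem.Chars.replace.go]
        by_cases hc : h = '*'
        · subst hc
          simp only [List.isPrefixOf, BEq.rfl, Bool.true_and, if_true]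
          rw [show (['*'].length = 1) from rfl, List.drop_one, List.tail_cons,
            ih f _ (by simpa using hle)]
          simp
        · have hpre : (['*'].isPrefixOf (h :: t)) = false := by
            simp [List.isPrefixOf]
            exact fun e => hc e.symm
          simp only [hpre, Bool.false_eq_true, if_false]
          rw [ih f _ (by simpa using hle)]
          simp [hc]

-- Chars.replace deleting '*' is a filter
theorem chars_replace_star (cs : List Char) :
    PySem.Chars.replace cs ['*'] [] = cs.filter (fun c => !(c == '*')) := by
  unfold PySem.Chars.replace
  simp only [List.isEmpty_cons, Bool.false_eq_true, if_false]
  simpa using replace_go_star cs cs.length [] (le_refl _)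

-- deleting the '*'s drops the length by exactly the '*' count
theorem filter_star_length (l : List Char) :
    (l.filter (fun c => !(c == '*'))).length + l.count '*' = l.length := by
  induction l with
  | nil => rfl
  | cons h t ih => by_cases hc : h = '*' <;> simp_all <;> omega

-- ===== VERDICT (by name: the statement is the Claim_ definition above) =====
theorem check_black_train_spec : Claim_equal_check_black_train := by
  intro tl _ hpre
  unfold Spec_check_black_train check_black_train check_black_train_alt
  have hlookup : ∀ (st : Int × Int), ∀ kv ∈ tl,
      ((PySem.Dict.mk tl).getD kv.1 []).foldl
        (fun st line =>
          line.toList.foldl (fun (st : Int × Int) c =>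
            let st' := (st.1, st.2 + 1)
            if c = '*' then (st'.1 + 1, st'.2) else st') st) st
      = kv.2.foldl
        (fun st line =>
          line.toList.foldl (fun (st : Int × Int) c =>
            let st' := (st.1, st.2 + 1)
            if c = '*' then (st'.1 + 1, st'.2) else st') st) st := by
    intro st kv hmem
    have : (PySem.Dict.mk tl).getD kv.1 [] = kv.2 :=
      PySem.Dict.getD_of_mem_items (PySem.Dict.mk tl) (k := kv.1) (v := kv.2) hmem hpre []
    rw [this]
  rw [PySem.List.foldl_congr_mem tl _ _ _ hlookup, outer_fold]
  -- the joined big string's characters are the flattened characters of all lines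
  have hbig : (PySem.Str.join "" (tl.map (fun kv => PySem.Str.join "" kv.2))).toList
      = (tl.flatMap (fun kv => kv.2)).flatMap String.toList := by
    have hempty : ("" : String).toList = [] := rfl
    simp only [PySem.Str.join, hempty, chars_join_nil_sep, String.toList_ofList, List.map_map]
    exact big_flat tl
  have hlen := filter_star_length ((tl.flatMap (fun kv => kv.2)).flatMap String.toList)
  simp only [PySem.Str.len, PySem.Str.replace, hbig, String.toList_ofList,
    show ("*" : String).toList = ['*'] from rfl, show ("" : String).toList = [] from rfl,
    chars_replace_star]
  simp only [List.cons.injEq, and_true]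
  omega
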